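-- pv_equiv track=rewrite | github.com/magulamaryna/-144.- | ZLATALR10_2.py | podil
-- ===== SOURCE A (Python) =====
-- def podil(m):
--     arrP=[]
--     arrN=[]
--     for i in range(len(m)):
--         for j in range(len(m[i])):
--             if m [i][j] > 0:
--                 arrP.append(m[i][j])
--             elif m[i][j] < 0:
--                 arrN.append(m[i][j])
--     return  arrP,arrN
-- ===== SOURCE B (Python) =====
-- def podil(m):
--     arrP = [x for row in m for x in row if x > 0]
--     arrN = [x for row in m for x in row if x < 0]
--     return arrP, arrN
-- ===== Notes on version B (the rewrite author's own statement) =====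
-- stated objective: simpler
-- what changed: Replaces the single index-driven nested loop that fills both buckets at once with two independent flattened filter comprehensions over the matrix, one per sign.
import Mathlib
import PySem

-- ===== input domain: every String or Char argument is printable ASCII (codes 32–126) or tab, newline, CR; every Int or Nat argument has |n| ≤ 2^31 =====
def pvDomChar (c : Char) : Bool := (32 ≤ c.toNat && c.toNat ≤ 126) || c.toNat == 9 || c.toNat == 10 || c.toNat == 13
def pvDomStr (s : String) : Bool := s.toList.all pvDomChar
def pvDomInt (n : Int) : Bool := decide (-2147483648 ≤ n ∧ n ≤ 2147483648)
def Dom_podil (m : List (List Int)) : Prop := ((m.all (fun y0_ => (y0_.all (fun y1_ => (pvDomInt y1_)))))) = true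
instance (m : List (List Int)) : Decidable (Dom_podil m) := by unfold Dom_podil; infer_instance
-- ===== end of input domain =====

-- B (objective: simpler): replaces A's single index-driven nested loop filling both buckets at once
-- with two independent flattened filter comprehensions over the matrix, one per sign; same values, same order.


-- ===== PORT A =====
def podil (m : List (List Int)) : List Int × List Int :=
  (PySem.List.pyRange 0 (PySem.List.len m) 1).foldl
    (fun acc i =>
      let row := PySem.List.pyGetD m i []
      (PySem.List.pyRange 0 (PySem.List.len row) 1).foldl
        (fun acc j =>
          let v := PySem.List.pyGetD row j 0
          if v > 0 then (acc.1 ++ [v], acc.2)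
          else if v < 0 then (acc.1, acc.2 ++ [v])
          else acc)
        acc)
    ([], [])

-- ===== PORT B =====
def podil_alt (m : List (List Int)) : List Int × List Int :=
  (m.flatMap (fun row => row.filter (fun x => decide (x > 0))),
   m.flatMap (fun row => row.filter (fun x => decide (x < 0))))

-- ===== PRECONDITION & SPEC =====
def Spec_podil (m : List (List Int)) (out : List Int × List Int) : Prop := out = podil_alt m
instance (m : List (List Int)) (out : List Int × List Int) : Decidable (Spec_podil m out) := by unfold Spec_podil; infer_instance

-- ===== CLAIM (what is proved, stated in full; the proofs are below) =====
def Claim_equal_podil : Prop := ∀ (m : List (List Int)), Dom_podil m → Spec_podil m (podil m)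

-- ===== LEMMAS AND PROOFS =====

-- ===== VERDICT (by name: the statement is the Claim_ definition above) =====
-- inner row loop: appends positives to acc.1, negatives to acc.2
theorem podil_row (row : List Int) (acc : List Int × List Int) :
    row.foldl
      (fun acc v =>
        if v > 0 then (acc.1 ++ [v], acc.2)
        else if v < 0 then (acc.1, acc.2 ++ [v])
        else acc)
      acc
    = (acc.1 ++ row.filter (fun x => decide (x > 0)),
       acc.2 ++ row.filter (fun x => decide (x < 0))) := by
  induction row generalizing acc with
  | nil => simp
  | cons v t ih =>
    simp only [List.foldl_cons, List.filter_cons]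
    by_cases h1 : v > 0
    · have h2 : ¬ v < 0 := by omega
      simp [h1, h2, ih, List.append_assoc]
    · by_cases h2 : v < 0
      · simp [h1, h2, ih, List.append_assoc]
      · simp [h1, h2, ih]

theorem podil_outer (m : List (List Int)) (acc : List Int × List Int) :
    m.foldl
      (fun acc row =>
        row.foldl
          (fun acc v =>
            if v > 0 then (acc.1 ++ [v], acc.2)
            else if v < 0 then (acc.1, acc.2 ++ [v])
            else acc)
          acc)
      acc
    = (acc.1 ++ m.flatMap (fun row => row.filter (fun x => decide (x > 0))),
       acc.2 ++ m.flatMap (fun row => row.filter (fun x => decide (x < 0)))) := by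
  induction m generalizing acc with
  | nil => simp
  | cons r t ih =>
    rw [List.foldl_cons, podil_row, ih]
    simp [List.append_assoc]

theorem podil_spec : Claim_equal_podil := by
  intro m _
  unfold Spec_podil podil podil_alt
  rw [show (PySem.List.len m) = (m.length : Int) from rfl]
  rw [PySem.List.foldl_pyRange_zero_pyGetD' m []
      (fun acc (row : List Int) =>
        (PySem.List.pyRange 0 (PySem.List.len row) 1).foldl
          (fun acc j =>
            let v := PySem.List.pyGetD row j 0
            if v > 0 then (acc.1 ++ [v], acc.2)
            else if v < 0 then (acc.1, acc.2 ++ [v])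
            else acc)
          acc) ([], [])]
  have hrow : ∀ (acc : List Int × List Int) (row : List Int),
      (PySem.List.pyRange 0 (PySem.List.len row) 1).foldl
        (fun acc j =>
          let v := PySem.List.pyGetD row j 0
          if v > 0 then (acc.1 ++ [v], acc.2)
          else if v < 0 then (acc.1, acc.2 ++ [v])
          else acc)
        acc
      = row.foldl
          (fun acc v =>
            if v > 0 then (acc.1 ++ [v], acc.2)
            else if v < 0 then (acc.1, acc.2 ++ [v])
            else acc)
          acc := by
    intro acc row
    rw [show (PySem.List.len row) = (row.length : Int) from rfl]
    exact PySem.List.foldl_pyRange_zero_pyGetD' row 0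
      (fun acc v =>
        if v > 0 then (acc.1 ++ [v], acc.2)
        else if v < 0 then (acc.1, acc.2 ++ [v])
        else acc) acc
  simp only [hrow]
  rw [podil_outer]
  simp
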